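-- pv_equiv track=rewrite | github.com/armpit-symphony/Shadow-ai-hunter | backend/workers/detector_worker.py | _domain_matches_list
-- ===== SOURCE A (Python) =====
-- from typing import Dict, List, Optional
--
-- def _domain_matches_list(domain: str, items: List[str]) -> bool:
--     for entry in items:
--         entry = entry.strip().lower()
--         if not entry:
--             continue
--         if entry.startswith("*."):
--             suffix = entry[2:]
--             if domain == suffix or domain.endswith(f".{suffix}"):
--                 return True
--         else:
--             if domain == entry or domain.endswith(f".{entry}"):
--                 return True
--     return False
-- ===== SOURCE B (Python) =====
-- def _domain_matches_list(domain, items):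
--     suffixes = set()
--     for item in items:
--         e = item.strip().lower()
--         if not e:
--             continue
--         suffixes.add(e[2:] if e.startswith("*.") else e)
--     candidates = {domain}
--     for i, ch in enumerate(domain):
--         if ch == '.':
--             candidates.add(domain[i + 1:])
--     return not suffixes.isdisjoint(candidates)
-- ===== Notes on version B (the rewrite author's own statement) =====
-- stated objective: idiomatic
-- what changed: Replaces A's scan that runs an equality-or-endswith test per entry with building a set of normalized entry suffixes once and intersecting it with the set of the domain's dot-delimited candidate suffixes.
import Mathlib
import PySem

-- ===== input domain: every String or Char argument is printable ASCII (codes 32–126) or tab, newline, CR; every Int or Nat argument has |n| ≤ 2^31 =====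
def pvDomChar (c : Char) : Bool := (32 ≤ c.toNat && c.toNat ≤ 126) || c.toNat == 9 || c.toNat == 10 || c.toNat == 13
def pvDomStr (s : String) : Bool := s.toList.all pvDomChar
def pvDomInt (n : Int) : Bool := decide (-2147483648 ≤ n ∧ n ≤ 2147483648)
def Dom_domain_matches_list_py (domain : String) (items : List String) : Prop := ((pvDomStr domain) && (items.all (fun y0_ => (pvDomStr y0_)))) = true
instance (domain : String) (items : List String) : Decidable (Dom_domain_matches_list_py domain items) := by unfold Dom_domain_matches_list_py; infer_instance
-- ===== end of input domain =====

-- B replaces A's linear scan with endswith tests by one set of normalized suffixes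
-- probed with the domain's own dot-suffixes (idiomatic set/intersection formulation).

-- ===== PORT A =====
-- A's for-loop with early return, on List Char; f".{suffix}" is '.' :: suffix.
def pvAloop (d : List Char) : List (List Char) → Bool
  | [] => false
  | e :: rest =>
    let e2 := PySem.Chars.lower (PySem.Chars.strip e)
    if e2 = [] then pvAloop d rest
    else if PySem.Chars.startswith e2 ['*', '.'] then
      let suffix := PySem.Chars.slice e2 (some 2) none
      if (d == suffix || PySem.Chars.endswith d ('.' :: suffix)) then true else pvAloop d rest
    else
      if (d == e2 || PySem.Chars.endswith d ('.' :: e2)) then true else pvAloop d rest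

def domain_matches_list_py (domain : String) (items : List String) : Bool :=
  pvAloop domain.toList (items.map String.toList)

-- ===== PORT B =====
-- normalization of one list entry: strip/lower, skip if empty, drop a leading "*."
def pvNorm (e : List Char) : Option (List Char) :=
  let e2 := PySem.Chars.lower (PySem.Chars.strip e)
  if e2 = [] then none
  else some (if PySem.Chars.startswith e2 ['*', '.'] then PySem.Chars.slice e2 (some 2) none else e2)

def pvSuffixes (items : List (List Char)) : PySem.Set (List Char) :=
  items.foldl (fun s e => match pvNorm e with
    | none => s
    | some v => PySem.Set.add s v) PySem.Set.empty

def pvCands (d : List Char) : PySem.Set (List Char) :=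
  (PySem.List.enumerate d).foldl
    (fun s p => if p.2 = '.' then PySem.Set.add s (PySem.List.slice d (some (p.1 + 1)) none) else s)
    (PySem.Set.add PySem.Set.empty d)

def domain_matches_list_py_alt (domain : String) (items : List String) : Bool :=
  !(PySem.Set.isdisjoint (pvSuffixes (items.map String.toList)) (pvCands domain.toList))

-- ===== PRECONDITION & SPEC =====
def Spec_domain_matches_list_py (domain : String) (items : List String) (out : Bool) : Prop := out = domain_matches_list_py_alt domain items
instance (domain : String) (items : List String) (out : Bool) : Decidable (Spec_domain_matches_list_py domain items out) := by unfold Spec_domain_matches_list_py; infer_instance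

-- ===== CLAIM (what is proved, stated in full; the proofs are below) =====
def Claim_equal_domain_matches_list_py : Prop := ∀ (domain : String) (items : List String), Dom_domain_matches_list_py domain items → Spec_domain_matches_list_py domain items (domain_matches_list_py domain items)

-- ===== LEMMAS AND PROOFS =====

-- the match condition of one normalized suffix, as A computes it
lemma pv_cond_iff (d s : List Char) :
    (d == s || PySem.Chars.endswith d ('.' :: s)) = true ↔ s = d ∨ ∃ i, d.drop i = '.' :: s := by
  simp only [Bool.or_eq_true, beq_iff_eq, PySem.Chars.endswith_iff]
  constructor
  · rintro (rfl | hsuf)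
    · exact Or.inl rfl
    · exact Or.inr ⟨d.length - ('.' :: s).length, (List.suffix_iff_eq_drop.mp hsuf).symm⟩
  · rintro (rfl | ⟨i, hi⟩)
    · exact Or.inl rfl
    · exact Or.inr (hi ▸ List.drop_suffix i d)

-- A's cons step, phrased through pvNorm
lemma pvAloop_cons (d e : List Char) (rest : List (List Char)) :
    pvAloop d (e :: rest) =
      (match pvNorm e with
       | none => pvAloop d rest
       | some s => if (d == s || PySem.Chars.endswith d ('.' :: s)) then true else pvAloop d rest) := by
  by_cases h1 : PySem.Chars.lower (PySem.Chars.strip e) = []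
  · simp [pvAloop, pvNorm, h1]
  · by_cases h2 : PySem.Chars.startswith (PySem.Chars.lower (PySem.Chars.strip e)) ['*', '.'] = true
    · simp [pvAloop, pvNorm, h1, h2]
    · simp [pvAloop, pvNorm, h1, h2]

-- A's loop is the existence of a matching normalized entry
lemma pvAloop_iff (d : List Char) (its : List (List Char)) :
    pvAloop d its = true ↔
      ∃ e ∈ its, ∃ s, pvNorm e = some s ∧ (d == s || PySem.Chars.endswith d ('.' :: s)) = true := by
  induction its with
  | nil => simp [pvAloop]
  | cons e rest ih =>
    rw [pvAloop_cons]
    cases h : pvNorm e with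
    | none => simp [h, ih]
    | some s =>
      dsimp only
      split_ifs with hc
      · exact iff_of_true rfl ⟨e, List.mem_cons_self, s, h, hc⟩
      · simp only [ih, List.mem_cons]
        constructor
        · rintro ⟨e', he', s', hn, hcond⟩
          exact ⟨e', Or.inr he', s', hn, hcond⟩
        · rintro ⟨e', (rfl | he'), s', hn, hcond⟩
          · rw [h] at hn; injection hn with hn; subst hn; exact absurd hcond hc
          · exact ⟨e', he', s', hn, hcond⟩

-- membership in the suffix set
lemma pvSuffixes_fold_mem (its : List (List Char)) (init : PySem.Set (List Char)) (v : List Char) :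
    v ∈ its.foldl (fun s e => match pvNorm e with
      | none => s
      | some w => PySem.Set.add s w) init ↔ v ∈ init ∨ ∃ e ∈ its, pvNorm e = some v := by
  induction its generalizing init with
  | nil => simp
  | cons e rest ih =>
    simp only [List.foldl_cons, ih]
    cases h : pvNorm e with
    | none => simp [h]
    | some w =>
      rw [PySem.Set.mem_add]
      constructor
      · rintro ((hv | rfl) | hv)
        · exact Or.inl hv
        · exact Or.inr ⟨e, by simp [h]⟩
        · obtain ⟨e', he', hn⟩ := hv; exact Or.inr ⟨e', by simp [he'], hn⟩
      · rintro (hv | ⟨e', he', hn⟩)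
        · exact Or.inl (Or.inl hv)
        · rcases List.mem_cons.mp he' with rfl | he'
          · exact Or.inl (Or.inr (by rw [hn] at h; injection h))
          · exact Or.inr ⟨e', he', hn⟩

lemma pvSuffixes_mem (its : List (List Char)) (v : List Char) :
    v ∈ pvSuffixes its ↔ ∃ e ∈ its, pvNorm e = some v := by
  unfold pvSuffixes
  rw [pvSuffixes_fold_mem]
  simp [PySem.Set.empty]

-- membership in the candidate fold, for any enumerate start and accumulator
lemma pvCands_fold_mem (d : List Char) (x : List Char) :
    ∀ (k : Nat) (tail : List Char) (init : PySem.Set (List Char)), tail = d.drop k →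
      (x ∈ (PySem.List.enumerate tail (k : Int)).foldl
          (fun s p => if p.2 = '.' then PySem.Set.add s (PySem.List.slice d (some (p.1 + 1)) none) else s) init ↔
        x ∈ init ∨ ∃ i, k ≤ i ∧ d.drop i = '.' :: x) := by
  intro k tail
  induction tail generalizing k with
  | nil =>
    intro init htail
    simp only [PySem.List.enumerate, List.foldl_nil]
    constructor
    · exact Or.inl
    · rintro (hx | ⟨i, hki, hdi⟩)
      · exact hx
      · exfalso
        have : d.drop i = [] := by
          have h1 : (d.drop k).drop (i - k) = d.drop i := by
            rw [List.drop_drop]; congr 1; omega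
          rw [← h1, ← htail]; simp
        simp [this] at hdi
  | cons c rest ih =>
    intro init htail
    have hrest : rest = d.drop (k + 1) := by
      have := congrArg List.tail htail
      simpa [List.tail_drop] using this
    have hdk : d.drop k = c :: d.drop (k + 1) := by rw [← htail, hrest]
    simp only [PySem.List.enumerate, List.foldl_cons]
    have hcast : (((k : Int) + 1)) = ((k + 1 : Nat) : Int) := by push_cast; ring
    rw [hcast, ih (k + 1) _ hrest]
    have hslice : PySem.List.slice d (some ((k + 1 : Nat) : Int)) none = d.drop (k + 1) := by
      rw [PySem.List.slice_from d (by positivity)]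
      simp
    constructor
    · rintro (hx | ⟨i, hki, hdi⟩)
      · by_cases hc : c = '.'
        · rw [if_pos hc, PySem.Set.mem_add] at hx
          rcases hx with hx | rfl
          · exact Or.inl hx
          · exact Or.inr ⟨k, le_refl k, by rw [hdk, hslice, hc]⟩
        · rw [if_neg hc] at hx; exact Or.inl hx
      · exact Or.inr ⟨i, by omega, hdi⟩
    · rintro (hx | ⟨i, hki, hdi⟩)
      · left
        by_cases hc : c = '.'
        · rw [if_pos hc, PySem.Set.mem_add]; exact Or.inl hx
        · rwa [if_neg hc]
      · rcases Nat.eq_or_lt_of_le hki with rfl | hlt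
        · left
          rw [hdk] at hdi
          injection hdi with h1 h2
          rw [if_pos h1, PySem.Set.mem_add, hslice]
          exact Or.inr h2.symm
        · right; exact ⟨i, by omega, hdi⟩

lemma pvCands_mem (d : List Char) (x : List Char) :
    x ∈ pvCands d ↔ x = d ∨ ∃ i, d.drop i = '.' :: x := by
  unfold pvCands
  rw [show (0 : Int) = ((0 : Nat) : Int) by norm_num] at *
  rw [pvCands_fold_mem d x 0 d _ (by simp)]
  rw [PySem.Set.mem_add]
  simp only [PySem.Set.empty, List.not_mem_nil, false_or, Nat.zero_le, true_and]

-- ===== VERDICT (by name: the statement is the Claim_ definition above) =====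
theorem domain_matches_list_py_spec : Claim_equal_domain_matches_list_py := by
  intro domain items _
  show domain_matches_list_py domain items = domain_matches_list_py_alt domain items
  rw [Bool.eq_iff_iff]
  unfold domain_matches_list_py domain_matches_list_py_alt
  rw [pvAloop_iff]
  rw [show (!(PySem.Set.isdisjoint (pvSuffixes (items.map String.toList)) (pvCands domain.toList))) = true ↔
      ∃ s ∈ pvSuffixes (items.map String.toList), s ∈ pvCands domain.toList by
    simp [PySem.Set.isdisjoint, PySem.Set.contains, List.any_eq_true]]
  constructor
  · rintro ⟨e, he, s, hn, hc⟩
    refine ⟨s, (pvSuffixes_mem _ s).mpr ⟨e, he, hn⟩, ?_⟩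
    rw [pvCands_mem]
    exact (pv_cond_iff _ s).mp hc
  · rintro ⟨s, hS, hC⟩
    obtain ⟨e, he, hn⟩ := (pvSuffixes_mem _ s).mp hS
    exact ⟨e, he, s, hn, (pv_cond_iff _ s).mpr ((pvCands_mem _ s).mp hC)⟩
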